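-- pv_equiv track=rewrite | github.com/Carlssor/aoc24 | aoc/day05/puzzle2.py | _create_new_list_that_adheres_to_rules
-- ===== SOURCE A (Python) =====
-- def _create_new_list_that_adheres_to_rules(rules: dict[int, set[int]], pages: list[int]) -> list[int]:
--     new_list = []
--     for current_page in pages:
--         has_to_be_before = rules.get(current_page, set())
--         insert_index = len(new_list)
--         for current_index in range(len(new_list), 0, -1):
--             check_letter = new_list[current_index - 1]
--             if check_letter in has_to_be_before:
--                 insert_index = new_list.index(check_letter)
--         new_list.insert(insert_index, current_page)
--     return new_list
-- ===== SOURCE B (Python) =====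
-- def _create_new_list_that_adheres_to_rules(rules: dict[int, set[int]], pages: list[int]) -> list[int]:
--     new_list = []
--     for current_page in pages:
--         has_to_be_before = rules.get(current_page, set())
--         for i, x in enumerate(new_list):
--             if x in has_to_be_before:
--                 new_list.insert(i, current_page)
--                 break
--         else:
--             new_list.append(current_page)
--     return new_list
-- ===== Notes on version B (the rewrite author's own statement) =====
-- stated objective: alternative
-- what changed: A's per-page backward index scan over range(len,0,-1) with a list.index call on every match is replaced by a single forward scan that inserts the page directly before the first element of its has_to_be_before set (append if none).
import Mathlib
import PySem

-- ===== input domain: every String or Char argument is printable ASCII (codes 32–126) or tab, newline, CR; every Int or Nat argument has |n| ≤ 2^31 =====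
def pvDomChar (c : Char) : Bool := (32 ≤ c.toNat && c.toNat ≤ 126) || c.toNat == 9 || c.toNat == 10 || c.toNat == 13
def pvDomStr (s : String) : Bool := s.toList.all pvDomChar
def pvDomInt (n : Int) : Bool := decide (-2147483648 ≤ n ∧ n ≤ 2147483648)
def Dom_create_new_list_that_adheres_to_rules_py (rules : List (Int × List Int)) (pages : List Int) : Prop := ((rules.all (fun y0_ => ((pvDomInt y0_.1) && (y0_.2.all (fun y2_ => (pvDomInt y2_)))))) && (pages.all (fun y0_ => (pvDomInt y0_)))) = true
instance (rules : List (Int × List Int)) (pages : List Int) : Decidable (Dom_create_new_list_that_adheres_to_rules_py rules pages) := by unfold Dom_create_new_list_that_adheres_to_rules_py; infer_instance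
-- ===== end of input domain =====

-- B replaces A's backward index scan + list.index per page with one forward scan that inserts
-- the page before the first element of its has_to_be_before set (objective: alternative).


-- ===== PORT A =====
-- literal transliteration: for each page, scan new_list backwards via range(len,0,-1);
-- on each member of has_to_be_before overwrite insert_index with new_list.index(check_letter).
def create_new_list_that_adheres_to_rules_py (rules : List (Int × List Int)) (pages : List Int) : List Int :=
  pages.foldl (fun new_list current_page =>
    let has_to_be_before := (PySem.Dict.mk rules).getD current_page []
    let insert_index : Int :=
      (PySem.List.pyRange (new_list.length : Int) 0 (-1)).foldl
        (fun insert_index current_index =>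
          match PySem.List.pyGet? new_list (current_index - 1) with
          | some check_letter =>
            if has_to_be_before.contains check_letter then
              match PySem.List.index? new_list check_letter with
              | some k => (k : Int)
              | none => insert_index        -- unreachable: check_letter ∈ new_list
            else insert_index
          | none => insert_index)           -- unreachable: 0 ≤ current_index - 1 < len
        (new_list.length : Int)
    PySem.List.insert new_list insert_index current_page) []

-- ===== PORT B =====
-- inner loop of Source B: forward scan, insert before first element in `before`, else append
def pvInsertBefore (before : List Int) (page : Int) : List Int → List Int
  | [] => [page]
  | x :: xs => if before.contains x then page :: x :: xs else x :: pvInsertBefore before page xs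

def create_new_list_that_adheres_to_rules_py_alt (rules : List (Int × List Int)) (pages : List Int) : List Int :=
  pages.foldl (fun new_list current_page =>
    pvInsertBefore ((PySem.Dict.mk rules).getD current_page []) current_page new_list) []

-- ===== PRECONDITION & SPEC =====
def Spec_create_new_list_that_adheres_to_rules_py (rules : List (Int × List Int)) (pages : List Int) (out : List Int) : Prop := out = create_new_list_that_adheres_to_rules_py_alt rules pages
instance (rules : List (Int × List Int)) (pages : List Int) (out : List Int) : Decidable (Spec_create_new_list_that_adheres_to_rules_py rules pages out) := by unfold Spec_create_new_list_that_adheres_to_rules_py; infer_instance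

-- ===== CLAIM (what is proved, stated in full; the proofs are below) =====
def Claim_equal_create_new_list_that_adheres_to_rules_py : Prop := ∀ (rules : List (Int × List Int)) (pages : List Int), Dom_create_new_list_that_adheres_to_rules_py rules pages → Spec_create_new_list_that_adheres_to_rules_py rules pages (create_new_list_that_adheres_to_rules_py rules pages)

-- ===== LEMMAS AND PROOFS =====

-- A's backward loop computes the index of the first element of nl that lies in S
-- (i.e. nl.findIdx, which is nl.length when no element matches).
-- if the first a elements contain no match, and nl[a] matches, then a is the first match
-- and list.index returns exactly a there
theorem pv_first_match (S nl : List Int) (a : Nat) (ha : a < nl.length)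
    (hpre : (nl.take a).any (fun x => S.contains x) = false)
    (hcur : S.contains (nl[a]'ha) = true) :
    nl.findIdx (fun x => S.contains x) = a ∧ PySem.List.index? nl (nl[a]'ha) = some a := by
  have hnotpre : ∀ x ∈ nl.take a, S.contains x = false := by
    intro x hx
    cases hcx : S.contains x with
    | false => rfl
    | true =>
        exact absurd (List.any_eq_true.mpr ⟨x, hx, hcx⟩) (by simp [hpre])
  have hsplit : nl = nl.take a ++ (nl[a]'ha) :: nl.drop (a + 1) := by
    conv_lhs => rw [← List.take_append_drop a nl]
    rw [List.drop_eq_getElem_cons ha]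
  have hnot : (nl[a]'ha) ∉ nl.take a := by
    intro hmem
    have := hnotpre _ hmem
    rw [hcur] at this
    exact Bool.true_eq_false.mp this
  constructor
  · have hlt : a < nl.length := ha
    rw [List.findIdx_eq hlt]
    refine ⟨hcur, ?_⟩
    intro j hj
    have hjlt : j < (nl.take a).length := by
      simp [List.length_take]
      omega
    have hmem : nl[j]'(by omega) ∈ nl.take a := by
      have : (nl.take a)[j]'hjlt = nl[j]'(by omega) := List.getElem_take
      rw [← this]
      exact List.getElem_mem hjlt
    simpa using hnotpre _ hmem
  · rw [PySem.List.index?_eq_some_iff]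
    exact ⟨nl.take a, nl.drop (a + 1), hsplit, by simp [List.length_take]; omega, hnot⟩

theorem pv_loop_eq_findIdx (S nl : List Int) (a : Nat) (init : Int) (ha : a ≤ nl.length) :
    (PySem.List.pyRange (a : Int) 0 (-1)).foldl
        (fun insert_index current_index =>
          match PySem.List.pyGet? nl (current_index - 1) with
          | some check_letter =>
            if S.contains check_letter then
              match PySem.List.index? nl check_letter with
              | some k => (k : Int)
              | none => insert_index
            else insert_index
          | none => insert_index)
        init
    = if (nl.take a).any (fun x => S.contains x) then (nl.findIdx (fun x => S.contains x) : Int)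
      else init := by
  induction a generalizing init with
  | zero =>
      rw [PySem.List.pyRange_neg_one_eq_nil (by norm_num)]
      simp
  | succ a ih =>
      have ha' : a ≤ nl.length := Nat.le_of_succ_le ha
      have halt : a < nl.length := ha
      have hcons : PySem.List.pyRange ((a + 1 : Nat) : Int) 0 (-1)
          = ((a + 1 : Nat) : Int) :: PySem.List.pyRange ((a : Nat) : Int) 0 (-1) := by
        rw [PySem.List.pyRange_neg_one_cons (by exact_mod_cast Nat.succ_pos a)]
        norm_num
      rw [hcons, List.foldl_cons, ih _ ha']
      have hget : PySem.List.pyGet? nl (((a + 1 : Nat) : Int) - 1) = some (nl[a]'halt) := by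
        have h1 : ((a + 1 : Nat) : Int) - 1 = ((a : Nat) : Int) := by push_cast; ring
        rw [h1, PySem.List.pyGet?_natCast]
        simp [halt]
      have htake : nl.take (a + 1) = nl.take a ++ [nl[a]'halt] := by
        rw [List.take_add_one]
        simp [halt]
      have hany1 : (nl.take (a + 1)).any (fun x => S.contains x)
          = ((nl.take a).any (fun x => S.contains x) || S.contains (nl[a]'halt)) := by
        rw [htake, List.any_append]
        simp
      by_cases hpre : (nl.take a).any (fun x => S.contains x) = true
      · have hc1 : (nl.take (a + 1)).any (fun x => S.contains x) = true := by
          rw [hany1, hpre]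
          simp
        rw [if_pos hpre, if_pos hc1]
      · rw [if_neg hpre]
        simp only [hget]
        cases hcur : S.contains (nl[a]'halt) with
        | true =>
            obtain ⟨hfi, hix⟩ := pv_first_match S nl a halt (by simpa using hpre) hcur
            have hc1 : (nl.take (a + 1)).any (fun x => S.contains x) = true := by
              rw [hany1, hcur]
              simp
            rw [if_pos hc1]
            simp only [PySem.List.index?_eq_idxOf?] at hix
            have hfi2 : List.findIdx (fun x => decide (x ∈ S)) nl = a := by
              rw [← hfi]
              simp [List.contains_eq_mem]
            simp [hix, hfi2]
        | false =>
            have hc1 : ¬ (nl.take (a + 1)).any (fun x => S.contains x) = true := by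
              rw [hany1, hcur]
              simpa using hpre
            rw [if_neg hc1]
            simp

-- inserting at findIdx is exactly the forward-scan insertion
theorem pv_insert_findIdx (S : List Int) (p : Int) (nl : List Int) :
    PySem.List.insert nl ((nl.findIdx (fun x => S.contains x) : Nat) : Int) p
      = pvInsertBefore S p nl := by
  induction nl with
  | nil => simp [pvInsertBefore, PySem.List.insert_zero]
  | cons x xs ih =>
      rw [List.findIdx_cons]
      cases hcx : S.contains x with
      | true =>
          have hx : x ∈ S := by simpa using hcx
          simp [PySem.List.insert_zero, pvInsertBefore, hx]
      | false =>
          have hk : List.findIdx (fun x => S.contains x) xs ≤ xs.length := List.findIdx_le_length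
          rw [cond_false]
          rw [PySem.List.insert_natCast _ _ _ (by simpa using Nat.succ_le_succ hk)]
          rw [PySem.List.insert_natCast _ _ _ hk] at ih
          simp only [pvInsertBefore, hcx, Bool.false_eq_true, if_false]
          rw [← ih]
          simp [List.take_succ_cons, List.drop_succ_cons]

theorem pv_step_eq (S : List Int) (p : Int) (nl : List Int) :
    PySem.List.insert nl
      ((PySem.List.pyRange (nl.length : Int) 0 (-1)).foldl
        (fun insert_index current_index =>
          match PySem.List.pyGet? nl (current_index - 1) with
          | some check_letter =>
            if S.contains check_letter then
              match PySem.List.index? nl check_letter with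
              | some k => (k : Int)
              | none => insert_index
            else insert_index
          | none => insert_index)
        (nl.length : Int)) p
    = pvInsertBefore S p nl := by
  rw [pv_loop_eq_findIdx S nl nl.length (nl.length : Int) le_rfl]
  by_cases h : (nl.take nl.length).any (fun x => S.contains x)
  · rw [if_pos h, pv_insert_findIdx]
  · rw [if_neg h]
    have hfi : nl.findIdx (fun x => S.contains x) = nl.length := by
      rw [List.findIdx_eq_length]
      intro x hx
      simp only [List.take_length, List.any_eq_true, not_exists] at h
      cases hcx : S.contains x with
      | false => rfl
      | true => exact absurd ⟨hx, hcx⟩ (h x)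
    rw [← hfi, pv_insert_findIdx]

-- ===== VERDICT (by name: the statement is the Claim_ definition above) =====
theorem create_new_list_that_adheres_to_rules_py_spec : Claim_equal_create_new_list_that_adheres_to_rules_py := by
  intro rules pages hd
  clear hd
  unfold Spec_create_new_list_that_adheres_to_rules_py
  unfold create_new_list_that_adheres_to_rules_py create_new_list_that_adheres_to_rules_py_alt
  induction pages using List.reverseRecOn with
  | nil => rfl
  | append_singleton xs x ih =>
      rw [List.foldl_append, List.foldl_append, ih]
      simp only [List.foldl_cons, List.foldl_nil]
      exact pv_step_eq _ x _
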